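-- pv_equiv track=rewrite | github.com/LuongHung10/Python_PTIT | PY01024 - Chẵn - lẻ.py | check
-- ===== SOURCE A (Python) =====
-- def check(n):
--     sum = 0
--     while n > 0:
--         sum += n % 10
--         n //= 10
--     if sum % 10 == 0:
--         return True
--     else:
--         return False
-- ===== SOURCE B (Python) =====
-- def check(n):
--     total = sum(int(c) for c in str(n)) if n > 0 else 0
--     return total % 10 == 0
-- ===== Notes on version B (the rewrite author's own statement) =====
-- stated objective: idiomatic
-- what changed: B sums the digits by iterating over the decimal string str(n) instead of extracting them arithmetically (modulo and floor-division by ten) in a while loop, and returns the comparison directly instead of an if/else over True/False.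
import Mathlib
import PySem

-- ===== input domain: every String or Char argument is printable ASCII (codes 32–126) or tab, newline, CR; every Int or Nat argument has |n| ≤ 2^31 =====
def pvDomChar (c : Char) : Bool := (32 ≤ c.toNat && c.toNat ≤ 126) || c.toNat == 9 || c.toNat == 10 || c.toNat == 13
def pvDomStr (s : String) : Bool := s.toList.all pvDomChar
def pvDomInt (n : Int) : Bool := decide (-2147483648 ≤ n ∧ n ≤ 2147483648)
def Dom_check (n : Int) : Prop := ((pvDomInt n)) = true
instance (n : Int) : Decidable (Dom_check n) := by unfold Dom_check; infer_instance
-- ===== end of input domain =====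

-- B sums the digits over the decimal string str(n) instead of a % 10 // 10 loop (idiomatic restructuring, same cost).


-- ===== PORT A =====
-- the while loop: while n > 0: sum += n % 10; n //= 10
def checkGo (n sum : Int) : Int :=
  if _h : n > 0 then checkGo (PySem.Int.floordiv n 10) (sum + PySem.Int.mod n 10)
  else sum
termination_by n.toNat
decreasing_by
  simp only [PySem.Int.floordiv, Int.fdiv_eq_ediv]
  omega

def check (n : Int) : Bool :=
  if PySem.Int.mod (checkGo n 0) 10 = 0 then true else false

-- ===== PORT B =====
-- int(c) on a single decimal-digit character is exactly its code minus 48 (exact: str(n) for n > 0 is all digits)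
def check_alt (n : Int) : Bool :=
  let total : Int :=
    if n > 0 then ((PySem.Int.toStr n).toList.map (fun c => (c.toNat : Int) - 48)).sum else 0
  PySem.Int.mod total 10 = 0

-- ===== PRECONDITION & SPEC =====
def Spec_check (n : Int) (out : Bool) : Prop := out = check_alt n
instance (n : Int) (out : Bool) : Decidable (Spec_check n out) := by unfold Spec_check; infer_instance

-- ===== CLAIM (what is proved, stated in full; the proofs are below) =====
def Claim_equal_check : Prop := ∀ (n : Int), Dom_check n → Spec_check n (check n)

-- ===== LEMMAS AND PROOFS =====

lemma checkGo_eq (n s : Int) : checkGo n s = s + ((Nat.digits 10 n.toNat).sum : Int) := by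
  by_cases h : n > 0
  · rw [checkGo.eq_def]
    simp only [h]
    have h10 : PySem.Int.floordiv n 10 = ((n.toNat / 10 : Nat) : Int) := by
      simp only [PySem.Int.floordiv, Int.fdiv_eq_ediv]; omega
    have hm : PySem.Int.mod n 10 = ((n.toNat % 10 : Nat) : Int) := by
      simp only [PySem.Int.mod, Int.fmod_eq_emod]; omega
    rw [h10, hm, checkGo_eq]
    rw [Nat.digits_def' (by norm_num : 1 < 10) (by omega : 0 < n.toNat)]
    simp only [Int.toNat_natCast, List.sum_cons]
    push_cast
    ring
  · rw [checkGo.eq_def, dif_neg h]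
    have : n.toNat = 0 := by omega
    simp [this]
termination_by n.toNat
decreasing_by omega

lemma digitChar_toNat (d : Nat) (h : d < 10) : (Nat.digitChar d).toNat = d + 48 := by
  interval_cases d <;> decide

lemma toDigitsCore_sum (fuel : Nat) : ∀ (n : Nat) (ds : List Char), n < fuel →
    ((Nat.toDigitsCore 10 fuel n ds).map (fun c => (c.toNat : Int) - 48)).sum
      = ((Nat.digits 10 n).sum : Int)
        + ((ds.map (fun c => (c.toNat : Int) - 48)).sum) := by
  induction fuel with
  | zero => intro n ds h; omega
  | succ fuel ih =>
    intro n ds h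
    rw [Nat.toDigitsCore]
    have hmod : n % 10 < 10 := by omega
    by_cases h0 : n / 10 = 0
    · simp only [h0, if_pos]
      simp only [List.map_cons, List.sum_cons, digitChar_toNat _ hmod]
      by_cases hn : n = 0
      · subst hn; simp
      · rw [Nat.digits_def' (by norm_num : 1 < 10) (by omega : 0 < n)]
        simp [h0]
    · simp only [h0, if_neg, not_false_iff]
      have hn : n ≠ 0 := by omega
      have hlt : n / 10 < fuel := by omega
      rw [ih (n / 10) _ hlt]
      rw [Nat.digits_def' (by norm_num : 1 < 10) (by omega : 0 < n)]
      simp only [List.map_cons, List.sum_cons, digitChar_toNat _ hmod]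
      push_cast
      ring

lemma charSum_toChars (n : Int) (h : n > 0) :
    ((PySem.Int.toChars n).map (fun c => (c.toNat : Int) - 48)).sum
      = ((Nat.digits 10 n.toNat).sum : Int) := by
  simp only [PySem.Int.toChars, if_neg (by omega : ¬ n < 0)]
  rw [Nat.toDigits, toDigitsCore_sum (n.toNat + 1) n.toNat [] (by omega)]
  simp

-- ===== VERDICT (by name: the statement is the Claim_ definition above) =====
theorem check_spec : Claim_equal_check := by
  intro n _
  unfold Spec_check check check_alt
  rw [PySem.Int.toList_toStr]
  by_cases h : n > 0
  · rw [checkGo_eq, charSum_toChars n h]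
    simp [h]
  · have hz : n.toNat = 0 := by omega
    rw [checkGo_eq]
    simp [h, hz]
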